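-- pv_equiv track=rewrite | github.com/zcy013/age-appropriate-apps-identification | rating_learner/learner_basic.py | delete_apis_manually
-- ===== SOURCE A (Python) =====
-- def delete_apis_manually(feature_list):
--     useless_apis = ['java/lang', 'java/util',
--                     'android/text', 'android/os/Looper', 'android/util', 'android/widget/',
--                     'org/json', 'printStackTrace', '<init>']
--     new_feature_list = []
--     contains = False
--     for A in feature_list:
--         for api in useless_apis:
--             if api in A:
--                 contains = True
--         if not contains:
--             new_feature_list.append(A)
--         contains = False
--     return new_feature_list
-- ===== SOURCE B (Python) =====
-- def delete_apis_manually(feature_list):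
--     useless_apis = ['java/lang', 'java/util',
--                     'android/text', 'android/os/Looper', 'android/util', 'android/widget/',
--                     'org/json', 'printStackTrace', '<init>']
--
--     def clean(s):
--         # one left-to-right position scan: at each offset test every pattern as a prefix
--         for j in range(len(s)):
--             if any(s.startswith(api, j) for api in useless_apis):
--                 return False
--         return True
--
--     return [s for s in feature_list if clean(s)]
-- ===== Notes on version B (the rewrite author's own statement) =====
-- stated objective: alternative
-- what changed: A runs nine independent substring searches per feature with a carried 'contains' flag and an append loop; B makes a single left-to-right scan over each feature's positions, testing every pattern as a prefix at each offset (early-exit), and selects features with a filter comprehension.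
import Mathlib
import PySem

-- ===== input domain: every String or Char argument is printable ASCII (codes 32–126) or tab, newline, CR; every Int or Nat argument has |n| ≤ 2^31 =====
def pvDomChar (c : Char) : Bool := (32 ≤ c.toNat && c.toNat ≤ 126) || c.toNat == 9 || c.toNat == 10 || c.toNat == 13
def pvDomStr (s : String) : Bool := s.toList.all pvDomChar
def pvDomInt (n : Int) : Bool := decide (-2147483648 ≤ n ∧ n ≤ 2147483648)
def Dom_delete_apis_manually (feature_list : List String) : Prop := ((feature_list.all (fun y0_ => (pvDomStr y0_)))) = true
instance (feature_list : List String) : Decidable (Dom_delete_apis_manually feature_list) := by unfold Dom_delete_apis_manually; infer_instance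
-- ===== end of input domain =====

-- B replaces A's per-pattern substring scans with flag bookkeeping by a single position
-- scan per feature (prefix test at each offset, early exit) feeding a filter; alternative, not faster.


-- the fixed pattern list both Pythons define verbatim
def uselessApis : List String :=
  ["java/lang", "java/util",
   "android/text", "android/os/Looper", "android/util", "android/widget/",
   "org/json", "printStackTrace", "<init>"]

-- ===== PORT A =====
-- state = (new_feature_list, contains); inner loop sets the flag, outer loop appends and resets it
def delete_apis_manually (feature_list : List String) : List String :=
  (feature_list.foldl
    (fun (st : List String × Bool) A =>
      let contains := uselessApis.foldl (fun c api => if PySem.Str.isIn api A then true else c) st.2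
      let acc := if !contains then st.1 ++ [A] else st.1
      (acc, false))
    ([], false)).1

-- ===== PORT B =====
-- Python's s.startswith(api, j) with 0 ≤ j ≤ len(s) is exactly a prefix test on s.toList.drop j
def altClean (s : String) : Bool :=
  !((List.range s.toList.length).any (fun j =>
      uselessApis.any (fun api => PySem.Chars.startswith (s.toList.drop j) api.toList)))

def delete_apis_manually_alt (feature_list : List String) : List String :=
  feature_list.filter altClean

-- ===== PRECONDITION & SPEC =====
def Spec_delete_apis_manually (feature_list : List String) (out : List String) : Prop := out = delete_apis_manually_alt feature_list
instance (feature_list : List String) (out : List String) : Decidable (Spec_delete_apis_manually feature_list out) := by unfold Spec_delete_apis_manually; infer_instance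

-- ===== CLAIM (what is proved, stated in full; the proofs are below) =====
def Claim_equal_delete_apis_manually : Prop := ∀ (feature_list : List String), Dom_delete_apis_manually feature_list → Spec_delete_apis_manually feature_list (delete_apis_manually feature_list)

-- ===== LEMMAS AND PROOFS =====

-- A's inner flag loop is a disjunction over the pattern list
theorem flag_foldl_eq (s : String) (l : List String) (c : Bool) :
    l.foldl (fun c api => if PySem.Str.isIn api s then true else c) c
      = (c || l.any (fun api => PySem.Str.isIn api s)) := by
  induction l generalizing c with
  | nil => simp
  | cons a t ih =>
    simp only [List.foldl_cons, List.any_cons, ih]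
    by_cases h : PySem.Str.isIn a s = true <;> simp [h, Bool.or_assoc, Bool.or_comm]

-- B's position scan decides the same "some pattern occurs in s" test
theorem altClean_eq (s : String) :
    altClean s = !(uselessApis.any (fun api => PySem.Str.isIn api s)) := by
  have hne : ∀ api ∈ uselessApis, api.toList ≠ [] := by decide
  unfold altClean
  congr 1
  rw [Bool.eq_iff_iff]
  simp only [List.any_eq_true, List.mem_range]
  constructor
  · rintro ⟨j, -, api, hmem, hpre⟩
    refine ⟨api, hmem, ?_⟩
    rw [PySem.Str.isIn_iff_infix, ← PySem.Chars.isIn_iff_infix,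
        ← PySem.Chars.exists_prefix_drop_iff_isIn]
    exact ⟨j, (PySem.Chars.startswith_iff _ _).mp hpre⟩
  · rintro ⟨api, hmem, hin⟩
    rw [PySem.Str.isIn_iff_infix, ← PySem.Chars.isIn_iff_infix,
        ← PySem.Chars.exists_prefix_drop_iff_isIn] at hin
    obtain ⟨j, hj⟩ := hin
    have hjlt : j < s.toList.length := by
      by_contra h
      push_neg at h
      rw [List.drop_eq_nil_of_le h] at hj
      exact hne api hmem (List.prefix_nil.mp hj)
    exact ⟨j, hjlt, api, hmem, (PySem.Chars.startswith_iff _ _).mpr hj⟩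

-- the outer loop, with contains entering each iteration reset to false, is a filter by altClean
theorem loopA_eq (fl : List String) (acc : List String) :
    (fl.foldl
      (fun (st : List String × Bool) A =>
        let contains := uselessApis.foldl (fun c api => if PySem.Str.isIn api A then true else c) st.2
        let acc := if !contains then st.1 ++ [A] else st.1
        (acc, false))
      (acc, false)).1 = acc ++ fl.filter altClean := by
  induction fl generalizing acc with
  | nil => simp
  | cons A t ih =>
    rw [List.foldl_cons]
    change (t.foldl _
      ((if !(uselessApis.foldl (fun c api => if PySem.Str.isIn api A then true else c) false)
          then acc ++ [A] else acc), false)).1 = _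
    rw [flag_foldl_eq,
        show (false || uselessApis.any fun api => PySem.Str.isIn api A) = !altClean A by
          rw [altClean_eq]; simp]
    cases h : altClean A
    · simp only [h, Bool.not_false, Bool.not_true, if_neg (by simp : ¬ (false = true))]
      rw [ih]; simp [List.filter_cons, h]
    · simp only [h, Bool.not_true, Bool.not_false, if_pos rfl]
      rw [ih]; simp [List.filter_cons, h]

-- ===== VERDICT (by name: the statement is the Claim_ definition above) =====
theorem delete_apis_manually_spec : Claim_equal_delete_apis_manually := by
  intro fl _
  show delete_apis_manually fl = delete_apis_manually_alt fl
  unfold delete_apis_manually delete_apis_manually_alt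
  simpa using loopA_eq fl []
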